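-- pv_equiv track=rewrite | github.com/AzzoCorp/121-8 | PyMakerGeo/AzJsUrb.py | extract_parcelle
-- ===== SOURCE A (Python) =====
-- def extract_parcelle(lieu):
--     parcelles = []
--     start = lieu.find('(')
--     while start != -1:
--         end = lieu.find(')', start)
--         if end != -1:
--             content = lieu[start+1:end]
--             if not content.lower().startswith('lot'):
--                 refs = content.split(',')
--                 for ref in refs:
--                     cleaned_ref = ref.strip()
--                     while cleaned_ref and cleaned_ref[0].isdigit():
--                         cleaned_ref = cleaned_ref[1:].strip()
--                     if cleaned_ref:
--                         parcelles.append(cleaned_ref)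
--             start = lieu.find('(', end)
--         else:
--             break
--     return parcelles
-- ===== SOURCE B (Python) =====
-- def extract_parcelle(lieu):
--     # one-pass state machine collecting parenthesized groups, then a single
--     # dropwhile-style pass stripping leading digits/whitespace from each ref
--     groups = []
--     buf = None
--     for ch in lieu:
--         if buf is None:
--             if ch == '(':
--                 buf = []
--         elif ch == ')':
--             groups.append(''.join(buf))
--             buf = None
--         else:
--             buf.append(ch)
--     parcelles = []
--     for content in groups:
--         if content.lower().startswith('lot'):
--             continue
--         for ref in content.split(','):
--             r = ref.strip()
--             i = 0
--             while i < len(r) and (r[i].isdigit() or r[i].isspace()):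
--                 i += 1
--             r = r[i:]
--             if r:
--                 parcelles.append(r)
--     return parcelles
-- ===== Notes on version B (the rewrite author's own statement) =====
-- stated objective: alternative
-- what changed: B replaces A's repeated find()-based index rescanning with a single left-to-right character state machine that collects parenthesized groups in one pass, and replaces A's strip-after-every-digit-removal inner loop with a single index-advancing skip over leading digits/whitespace.
import Mathlib
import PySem

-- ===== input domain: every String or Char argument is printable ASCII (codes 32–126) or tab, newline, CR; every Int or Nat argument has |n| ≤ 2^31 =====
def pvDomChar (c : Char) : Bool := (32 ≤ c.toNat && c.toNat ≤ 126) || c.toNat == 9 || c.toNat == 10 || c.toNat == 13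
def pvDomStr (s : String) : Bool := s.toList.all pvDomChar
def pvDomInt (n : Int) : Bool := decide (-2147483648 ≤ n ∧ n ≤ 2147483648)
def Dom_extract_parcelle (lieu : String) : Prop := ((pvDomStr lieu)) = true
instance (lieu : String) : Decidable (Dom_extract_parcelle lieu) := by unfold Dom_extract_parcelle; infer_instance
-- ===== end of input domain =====

-- B replaces A's find-index rescanning loop by a one-pass character state machine and
-- A's repeated strip-after-each-digit loop by a single skip pass (objective: alternative).

-- ===== PORT A =====
-- termination helpers for the ports (cited by name in decreasing_by)
theorem pv_length_strip_le (l : List Char) : (PySem.Chars.strip l).length ≤ l.length := by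
  unfold PySem.Chars.strip PySem.Chars.rstrip PySem.Chars.lstrip
  have h1 := List.length_dropWhile_le PySem.Chars.isspace (List.dropWhile PySem.Chars.isspace l).reverse
  have h2 := List.length_dropWhile_le PySem.Chars.isspace l
  simp only [List.length_reverse] at h1 ⊢
  omega

-- small helper facts keeping the port-reachable proof terms small
theorem pv_clamp_facts (st n : Int) :
    0 ≤ (if st < 0 then if st + n < 0 then 0 else st + n else st)
    ∧ (st < 0 ∨ (if st < 0 then if st + n < 0 then 0 else st + n else st) = st) := by
  by_cases h1 : st < 0
  · by_cases h2 : st + n < 0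
    · rw [if_pos h1, if_pos h2]
      exact ⟨le_refl 0, Or.inl h1⟩
    · rw [if_pos h1, if_neg h2]
      exact ⟨not_lt.mp h2, Or.inl h1⟩
  · rw [if_neg h1]
    exact ⟨not_lt.mp h1, Or.inr rfl⟩

theorem pv_ff_arith (n stc r st : Int) (h0 : 0 ≤ stc) (hle : ¬ n < stc) (hr0 : -1 ≤ r)
    (hrne : ¬ r = -1) (hrlen : r ≤ n - (stc.toNat : Int))
    (hst : st < 0 ∨ stc = st) :
    st ≤ stc + r ∧ 0 ≤ stc + r ∧ stc + r ≤ n ∧ (stc + r).toNat = stc.toNat + r.toNat := by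
  omega

theorem pv_findFrom_spec (s sub : List Char) (st : Int)
    (h : PySem.Chars.findFrom s sub st none ≠ -1) :
    st ≤ PySem.Chars.findFrom s sub st none ∧ 0 ≤ PySem.Chars.findFrom s sub st none ∧
    PySem.Chars.findFrom s sub st none ≤ s.length ∧
    sub <+: s.drop (PySem.Chars.findFrom s sub st none).toNat := by
  have hEq : PySem.Chars.findFrom s sub st none =
      (if (s.length : Int) < (if st < 0 then if st + (s.length : Int) < 0 then 0 else st + (s.length : Int) else st) then -1
       else if PySem.Chars.find (List.drop (if st < 0 then if st + (s.length : Int) < 0 then 0 else st + (s.length : Int) else st).toNat (List.take ((s.length : Int)).toNat s)) sub = -1 then -1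
       else (if st < 0 then if st + (s.length : Int) < 0 then 0 else st + (s.length : Int) else st) +
            PySem.Chars.find (List.drop (if st < 0 then if st + (s.length : Int) < 0 then 0 else st + (s.length : Int) else st).toNat (List.take ((s.length : Int)).toNat s)) sub) := rfl
  have hp := pv_clamp_facts st (s.length : Int)
  generalize hstc : (if st < 0 then if st + (s.length : Int) < 0 then 0 else st + (s.length : Int) else st) = stc at hEq hp
  have hr1 : -1 ≤ PySem.Chars.find (List.drop stc.toNat (List.take ((s.length : Int)).toNat s)) sub :=
    PySem.Chars.neg_one_le_find _ _
  have hr2 : PySem.Chars.find (List.drop stc.toNat (List.take ((s.length : Int)).toNat s)) sub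
      ≤ ((List.drop stc.toNat (List.take ((s.length : Int)).toNat s)).length : Int) :=
    PySem.Chars.find_le_length _ _
  have hr2' : ((List.drop stc.toNat (List.take ((s.length : Int)).toNat s)).length : Int)
      ≤ (s.length : Int) - (stc.toNat : Int) := by
    rw [List.length_drop, List.length_take]
    omega
  have hr3 : PySem.Chars.find (List.drop stc.toNat (List.take ((s.length : Int)).toNat s)) sub ≠ -1 →
      sub <+: List.drop (stc.toNat + (PySem.Chars.find (List.drop stc.toNat (List.take ((s.length : Int)).toNat s)) sub).toNat) s := by
    intro hne
    have hpre := (PySem.Chars.find_spec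
      (s := List.drop stc.toNat (List.take ((s.length : Int)).toNat s)) (sub := sub) (by omega)).1
    rw [List.drop_drop, List.drop_take] at hpre
    exact hpre.trans (List.take_prefix _ _)
  generalize hrg : PySem.Chars.find (List.drop stc.toNat (List.take ((s.length : Int)).toNat s)) sub = r at hEq hr1 hr2 hr3
  split_ifs at hEq with c1 c2
  · exact absurd hEq h
  · exact absurd hEq h
  · rw [hEq] at h ⊢
    obtain ⟨a1, a2, a3, a4⟩ := pv_ff_arith (s.length) stc r st hp.1 c1 hr1 c2 (le_trans hr2 hr2') hp.2
    refine ⟨a1, a2, a3, ?_⟩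
    rw [a4]
    exact hr3 c2

-- while cleaned_ref and cleaned_ref[0].isdigit(): cleaned_ref = cleaned_ref[1:].strip()
theorem pv_digitLoop_dec (ch : Char) (rest : List Char) :
    (PySem.Chars.strip rest).length < (ch :: rest).length := by
  have := pv_length_strip_le rest; simp; omega

def digitLoopA : List Char → List Char
  | [] => []
  | ch :: rest =>
      if PySem.Chars.isdigit ch then digitLoopA (PySem.Chars.strip rest) else ch :: rest
termination_by l => l.length
decreasing_by
  exact pv_digitLoop_dec ch rest

-- the body processing one parenthesized content (the inner 'if not …lot…: for ref in …')
def procContentA (content : List Char) (acc : List (List Char)) : List (List Char) :=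
  if PySem.Chars.startswith (PySem.Chars.lower content) ['l','o','t'] then acc
  else
    (PySem.Chars.splitOn content [',']).foldl
      (fun a ref =>
        let cleaned := digitLoopA (PySem.Chars.strip ref)
        if cleaned ≠ [] then a ++ [cleaned] else a) acc

-- the outer 'while start != -1' loop of A, on indices into s exactly as in the Python
theorem pv_dec_arith (n e f start : Int) (hstart : ¬ start = -1)
    (he1 : start ≤ e) (he2 : 0 ≤ e) (he3 : e ≤ n)
    (hf : f = -1 ∨ (e ≤ f ∧ 0 ≤ f ∧ f ≤ n ∧ ¬ e = f)) :
    (if f = -1 then 0 else (n + 1 - f).toNat) < (if start = -1 then 0 else (n + 1 - start).toNat) := by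
  split_ifs <;> omega

theorem pv_prefix_ne (s : List Char) (a b : Int) (ha : [')'] <+: s.drop a.toNat)
    (hb : ['('] <+: s.drop b.toNat) : ¬ a = b := by
  intro hEq
  rw [hEq] at ha
  rcases ha with ⟨t1, ht1⟩
  rcases hb with ⟨t2, ht2⟩
  rw [← ht2] at ht1
  simp at ht1

theorem pv_aLoop_dec (s : List Char) (start : Int) (hstart : ¬ start = -1)
    (he : ¬ PySem.Chars.findFrom s [')'] start = -1) :
    (if PySem.Chars.findFrom s ['('] (PySem.Chars.findFrom s [')'] start) = -1 then 0
      else ((s.length : Int) + 1 - PySem.Chars.findFrom s ['('] (PySem.Chars.findFrom s [')'] start)).toNat)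
    < (if start = -1 then 0 else ((s.length : Int) + 1 - start).toNat) := by
  obtain ⟨hE1, hE2, hE3, hEp⟩ := pv_findFrom_spec s [')'] start he
  by_cases hn : PySem.Chars.findFrom s ['('] (PySem.Chars.findFrom s [')'] start) = -1
  · exact pv_dec_arith s.length _ _ start hstart hE1 hE2 hE3 (Or.inl hn)
  · obtain ⟨hN1, hN2, hN3, hNp⟩ := pv_findFrom_spec s ['('] _ hn
    exact pv_dec_arith s.length _ _ start hstart hE1 hE2 hE3
      (Or.inr ⟨hN1, hN2, hN3, pv_prefix_ne s _ _ hEp hNp⟩)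

def aLoop (s : List Char) (start : Int) (acc : List (List Char)) : List (List Char) :=
  if start = -1 then acc
  else
    let e := PySem.Chars.findFrom s [')'] start
    if he : e ≠ -1 then
      aLoop s (PySem.Chars.findFrom s ['('] e)
        (procContentA (PySem.Chars.slice s (some (start + 1)) (some e)) acc)
    else acc
termination_by (if start = -1 then 0 else ((s.length : Int) + 1 - start).toNat)
decreasing_by
  rename_i hstart
  exact pv_aLoop_dec s start hstart (by simpa using he)

def extract_parcelle (lieu : String) : List String :=
  (aLoop lieu.toList (PySem.Chars.find lieu.toList ['(']) []).map (fun cs => String.ofList cs)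

-- ===== PORT B =====
-- one transition of B's character state machine (buf = None ↔ first component none)
def bStep (st : Option (List Char) × List (List Char)) (ch : Char) :
    Option (List Char) × List (List Char) :=
  match st with
  | (none, gs) => if ch = '(' then (some [], gs) else (none, gs)
  | (some buf, gs) => if ch = ')' then (none, gs ++ [buf]) else (some (buf ++ [ch]), gs)

-- B's index-advancing while loop 'while i < len(r) and (r[i].isdigit() or r[i].isspace())'
def skipDS : List Char → List Char
  | [] => []
  | c :: rest =>
      if PySem.Chars.isdigit c || PySem.Chars.isspace c then skipDS rest else c :: rest

def procContentB (content : List Char) (acc : List (List Char)) : List (List Char) :=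
  if PySem.Chars.startswith (PySem.Chars.lower content) ['l','o','t'] then acc
  else
    (PySem.Chars.splitOn content [',']).foldl
      (fun a ref =>
        let r := skipDS (PySem.Chars.strip ref)
        if r ≠ [] then a ++ [r] else a) acc

def extract_parcelle_alt (lieu : String) : List String :=
  let groups := (lieu.toList.foldl bStep (none, [])).2
  (groups.foldl (fun acc content => procContentB content acc) []).map (fun cs => String.ofList cs)

-- ===== PRECONDITION & SPEC =====
def Spec_extract_parcelle (lieu : String) (out : List String) : Prop := out = extract_parcelle_alt lieu
instance (lieu : String) (out : List String) : Decidable (Spec_extract_parcelle lieu out) := by unfold Spec_extract_parcelle; infer_instance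

-- ===== CLAIM (what is proved, stated in full; the proofs are below) =====
def Claim_equal_extract_parcelle : Prop := ∀ (lieu : String), Dom_extract_parcelle lieu → Spec_extract_parcelle lieu (extract_parcelle lieu)

-- ===== LEMMAS AND PROOFS =====

-- the groups A's scan and B's state machine both extract, as a structural recursion
mutual
def groupsRec : List Char → List (List Char)
  | [] => []
  | c :: r => if c = '(' then innerRec r [] else groupsRec r
def innerRec : List Char → List Char → List (List Char)
  | [], _ => []
  | c :: r, buf => if c = ')' then buf :: groupsRec r else innerRec r (buf ++ [c])
end

theorem pv_fold_groups (l : List Char) : ∀ gs : List (List Char),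
    ((l.foldl bStep (none, gs)).2 = gs ++ groupsRec l) ∧
    ∀ buf, ((l.foldl bStep (some buf, gs)).2 = gs ++ innerRec l buf) := by
  induction l with
  | nil => intro gs; simp [groupsRec, innerRec]
  | cons c r ih =>
    intro gs
    constructor
    · by_cases hc : c = '('
      · simp only [List.foldl_cons, bStep, hc, groupsRec, reduceIte]
        exact (ih gs).2 []
      · simp only [List.foldl_cons, bStep, groupsRec, if_neg hc]
        exact (ih gs).1
    · intro buf
      by_cases hc : c = ')'
      · simp only [List.foldl_cons, bStep, hc, innerRec, reduceIte]
        rw [(ih (gs ++ [buf])).1]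
        simp
      · simp only [List.foldl_cons, bStep, innerRec, if_neg hc]
        exact (ih gs).2 (buf ++ [c])

theorem pv_groupsRec_no_open (t : List Char) (h : '(' ∉ t) : groupsRec t = [] := by
  induction t with
  | nil => simp [groupsRec]
  | cons c r ih =>
    have hc : c ≠ '(' := fun hc => h (hc ▸ List.mem_cons_self)
    simp only [groupsRec, if_neg hc]
    exact ih (fun hm => h (List.mem_cons_of_mem _ hm))

theorem pv_innerRec_no_close (u : List Char) : ')' ∉ u → ∀ buf, innerRec u buf = [] := by
  induction u with
  | nil => intro _ buf; simp [innerRec]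
  | cons c r ih =>
    intro h buf
    have hc : c ≠ ')' := fun hc => h (hc ▸ List.mem_cons_self)
    simp only [innerRec, if_neg hc]
    exact ih (fun hm => h (List.mem_cons_of_mem _ hm)) _

theorem pv_single_prefix_drop (s : List Char) (i : Nat) (c : Char) (h : i < s.length) :
    [c] <+: s.drop i ↔ s[i] = c := by
  rw [List.drop_eq_getElem_cons h]
  constructor
  · intro hp
    rcases hp with ⟨t, ht⟩
    exact (List.cons.injEq _ _ _ _ ▸ ht).1.symm
  · intro hp
    exact hp ▸ ⟨_, rfl⟩

theorem pv_groupsRec_skip (s : List Char) : ∀ (d k : Nat), k + d ≤ s.length →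
    (∀ i (h : i < s.length), k ≤ i → i < k + d → s[i] ≠ '(') →
    groupsRec (s.drop k) = groupsRec (s.drop (k + d)) := by
  intro d
  induction d with
  | zero => intro k _ _; rfl
  | succ d ih =>
    intro k hk hno
    have hklen : k < s.length := by omega
    rw [List.drop_eq_getElem_cons hklen]
    have hc : s[k] ≠ '(' := hno k hklen le_rfl (by omega)
    simp only [groupsRec, if_neg hc]
    have := ih (k + 1) (by omega) (fun i h h1 h2 => hno i h (by omega) (by omega))
    rw [this, show k + 1 + d = k + (d + 1) from by omega]

theorem pv_innerRec_at (m : Nat) : ∀ (u : List Char) (buf : List Char) (hm : m < u.length),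
    u[m] = ')' → (∀ i (h : i < u.length), i < m → u[i] ≠ ')') →
    innerRec u buf = (buf ++ u.take m) :: groupsRec (u.drop (m + 1)) := by
  induction m with
  | zero =>
    intro u buf hm hc _
    match u, hm with
    | c :: r, _ =>
      simp only [List.getElem_cons_zero] at hc
      simp [innerRec, hc]
  | succ m ih =>
    intro u buf hm hc hno
    match u, hm with
    | c :: r, hm =>
      have hc0 : c ≠ ')' := by
        have := hno 0 (by omega) (by omega)
        simpa using this
      simp only [innerRec, if_neg hc0]
      have hm' : m < r.length := by simpa using hm
      have hcm : r[m] = ')' := by simpa using hc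
      rw [ih r (buf ++ [c]) hm' hcm (fun i h h2 => by
        have := hno (i + 1) (by simpa using Nat.succ_lt_succ h) (by omega)
        simpa using this)]
      simp

-- no trailing whitespace
def pvNoTrail (l : List Char) : Prop :=
  ∀ c, l.getLast? = some c → PySem.Chars.isspace c = false

theorem pv_dw_idem (p : Char → Bool) (l : List Char) :
    List.dropWhile p (List.dropWhile p l) = List.dropWhile p l := by
  rw [List.dropWhile_eq_self_iff]
  intro hl
  have hne : List.dropWhile p l ≠ [] := List.length_pos_iff.mp hl
  have h := List.head_dropWhile_not p hne
  rw [← List.head_eq_getElem hne]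
  simp [h]

theorem pv_lsfix_iff (l : List Char) :
    PySem.Chars.lstrip l = l ↔ ∀ (h : 0 < l.length), ¬ PySem.Chars.isspace l[0] = true := by
  unfold PySem.Chars.lstrip
  exact List.dropWhile_eq_self_iff

theorem pv_rstrip_eq_of_noTrail (l : List Char) (h : pvNoTrail l) :
    PySem.Chars.rstrip l = l := by
  unfold PySem.Chars.rstrip
  have hdw : List.dropWhile PySem.Chars.isspace l.reverse = l.reverse := by
    rw [List.dropWhile_eq_self_iff]
    intro hl
    have hne : l.reverse ≠ [] := List.length_pos_iff.mp hl
    have h0 : l.reverse.head? = some (l.reverse.head hne) := List.head?_eq_head hne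
    rw [List.head?_reverse] at h0
    rw [← List.head_eq_getElem hne]
    simpa using h _ h0
  rw [hdw, List.reverse_reverse]

theorem pv_noTrail_tail (c : Char) (r : List Char) (h : pvNoTrail (c :: r)) : pvNoTrail r := by
  intro a ha
  apply h a
  rw [List.getLast?_cons, ha]
  rfl

theorem pv_noTrail_dropWhile (p : Char → Bool) (l : List Char) (h : pvNoTrail l) :
    pvNoTrail (List.dropWhile p l) := by
  intro a ha
  obtain ⟨u, hu⟩ := List.dropWhile_suffix (l := l) p
  apply h a
  rw [← hu]
  rw [List.getLast?_append_of_ne_nil]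
  · exact ha
  · intro hz; rw [hz] at ha; simp at ha

theorem pv_noTrail_rstrip (l : List Char) : pvNoTrail (PySem.Chars.rstrip l) := by
  intro a ha
  unfold PySem.Chars.rstrip at ha
  rw [← List.head?_reverse, List.reverse_reverse] at ha
  have hne : List.dropWhile PySem.Chars.isspace l.reverse ≠ [] := by
    intro hz; rw [hz] at ha; simp at ha
  have := List.head_dropWhile_not PySem.Chars.isspace hne
  rw [List.head?_eq_head hne] at ha
  cases ha
  exact this

theorem pv_noTrail_strip (l : List Char) : pvNoTrail (PySem.Chars.strip l) :=
  pv_noTrail_rstrip _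

theorem pv_lstrip_rstrip_fix (y : List Char) (h : PySem.Chars.lstrip y = y) :
    PySem.Chars.lstrip (PySem.Chars.rstrip y) = PySem.Chars.rstrip y := by
  rw [pv_lsfix_iff] at h ⊢
  intro hl
  have hpre : PySem.Chars.rstrip y <+: y := by
    unfold PySem.Chars.rstrip
    obtain ⟨t, ht⟩ := List.dropWhile_suffix (l := y.reverse) PySem.Chars.isspace
    refine ⟨t.reverse, ?_⟩
    have := congrArg List.reverse ht
    simp only [List.reverse_append, List.reverse_reverse] at this
    exact this
  rw [hpre.getElem hl]
  exact h (by have := hpre.length_le; omega)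

theorem pv_skip_lstrip (r : List Char) : skipDS (PySem.Chars.lstrip r) = skipDS r := by
  induction r with
  | nil => rfl
  | cons c t ih =>
    by_cases hc : PySem.Chars.isspace c = true
    · unfold PySem.Chars.lstrip at ih ⊢
      rw [List.dropWhile_cons_of_pos hc, ih]
      rw [skipDS]
      simp [hc]
    · unfold PySem.Chars.lstrip
      rw [List.dropWhile_cons_of_neg hc]

-- tail t of a stripped string: strip t = lstrip t
theorem pv_strip_tail (t : List Char) (h : pvNoTrail t) :
    PySem.Chars.strip t = PySem.Chars.lstrip t := by
  unfold PySem.Chars.strip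
  exact pv_rstrip_eq_of_noTrail _ (pv_noTrail_dropWhile _ _ h)

theorem pv_digitLoop_skip_aux : ∀ (n : Nat) (x : List Char), x.length ≤ n →
    pvNoTrail x → PySem.Chars.lstrip x = x → digitLoopA x = skipDS x := by
  intro n
  induction n with
  | zero =>
    intro x hx _ _
    have : x = [] := List.eq_nil_of_length_eq_zero (by omega)
    subst this; rw [digitLoopA, skipDS]
  | succ n ih =>
    intro x hx hnt hls
    match x with
    | [] => rw [digitLoopA, skipDS]
    | c :: t =>
      have hcns : ¬ PySem.Chars.isspace c = true := by
        have := (pv_lsfix_iff _).mp hls (by simp)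
        simpa using this
      by_cases hd : PySem.Chars.isdigit c = true
      · rw [digitLoopA, if_pos hd, skipDS]
        rw [if_pos (by simp [hd])]
        -- goal: digitLoopA (strip t) = skipDS t
        have hntt : pvNoTrail t := pv_noTrail_tail c t hnt
        have hst : PySem.Chars.strip t = PySem.Chars.lstrip t := pv_strip_tail t hntt
        have h1 : digitLoopA (PySem.Chars.strip t) = skipDS (PySem.Chars.strip t) := by
          apply ih
          · have := pv_length_strip_le t; simp at hx; omega
          · exact pv_noTrail_strip t
          · rw [hst]; unfold PySem.Chars.lstrip; exact pv_dw_idem _ _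
        rw [h1, hst, pv_skip_lstrip]
      · rw [digitLoopA, if_neg hd, skipDS, if_neg (by simp [hd, hcns])]

theorem pv_digitLoop_eq_skip (s : List Char) :
    digitLoopA (PySem.Chars.strip s) = skipDS (PySem.Chars.strip s) := by
  apply pv_digitLoop_skip_aux (PySem.Chars.strip s).length _ le_rfl
  · exact pv_noTrail_strip s
  · unfold PySem.Chars.strip
    apply pv_lstrip_rstrip_fix
    unfold PySem.Chars.lstrip
    exact pv_dw_idem _ _

theorem pv_proc_eq (content : List Char) (acc : List (List Char)) :
    procContentA content acc = procContentB content acc := by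
  unfold procContentA procContentB
  split_ifs with h
  · rfl
  · congr 1
    funext a ref
    simp only [pv_digitLoop_eq_skip]

theorem pv_aLoop_eq (s : List Char) : ∀ (fuel k : Nat), s.length - k ≤ fuel → k ≤ s.length →
    ∀ acc, aLoop s (PySem.Chars.findFrom s ['('] (k : Int)) acc =
      (groupsRec (s.drop k)).foldl (fun a c => procContentA c a) acc := by
  intro fuel
  induction fuel with
  | zero =>
    intro k hfuel hk acc
    have hkl : k = s.length := by omega
    subst hkl
    have hf : PySem.Chars.findFrom s ['('] ((s.length : Nat) : Int) = -1 := by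
      by_contra hf
      obtain ⟨h1, h2, h3, hp⟩ := pv_findFrom_spec _ _ _ hf
      have hEq : (PySem.Chars.findFrom s ['('] ((s.length : Nat) : Int)).toNat = s.length := by omega
      rw [hEq] at hp
      simp at hp
    rw [hf, aLoop]
    simp [groupsRec]
  | succ fuel ih =>
    intro k hfuel hk acc
    by_cases hf : PySem.Chars.findFrom s ['('] (k : Int) = -1
    · rw [hf, aLoop]
      have hni : ¬ ['('] <:+: s.drop k :=
        (PySem.Chars.findFrom_natCast_eq_neg_one_iff s ['('] k hk).mp hf
      have hnm : '(' ∉ s.drop k := by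
        intro hm
        obtain ⟨u, v, huv⟩ := List.append_of_mem hm
        exact hni ⟨u, v, by rw [huv]; simp⟩
      rw [pv_groupsRec_no_open _ hnm]
      simp
    · obtain ⟨hf1, hf2, hf3, hfp⟩ := pv_findFrom_spec s ['('] (k : Int) hf
      set j := (PySem.Chars.findFrom s ['('] (k : Int)).toNat with hjdef
      have hj : PySem.Chars.findFrom s ['('] (k : Int) = (j : Int) := by omega
      have hjlen : j < s.length := by
        by_contra hc
        have hnil : s.drop j = [] := List.drop_eq_nil_of_le (by omega)
        rw [hnil] at hfp; simp at hfp
      have hsj : s[j] = '(' := (pv_single_prefix_drop s j '(' hjlen).mp hfp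
      have hmin := (PySem.Chars.findFrom_natCast_spec s ['('] k hk hf).2.2
      have hskip : groupsRec (s.drop k) = groupsRec (s.drop j) := by
        have hstep := pv_groupsRec_skip s (j - k) k (by omega) (fun i h h1 h2 => by
          intro hEq
          exact hmin i h1 (by omega) ((pv_single_prefix_drop s i '(' h).mpr hEq))
        rwa [show k + (j - k) = j from by omega] at hstep
      have hdj : s.drop j = '(' :: s.drop (j + 1) := by
        rw [List.drop_eq_getElem_cons hjlen, hsj]
      by_cases he : PySem.Chars.findFrom s [')'] (PySem.Chars.findFrom s ['('] (k : Int)) = -1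
      · rw [aLoop, if_neg hf]
        simp only [he, ne_eq, not_true_eq_false, dite_false]
        have hnc' : ¬ [')'] <:+: s.drop j := by
          rw [hj] at he
          exact (PySem.Chars.findFrom_natCast_eq_neg_one_iff s [')'] j (by omega)).mp he
        have hnc : ')' ∉ s.drop (j + 1) := by
          intro hm
          obtain ⟨u, v, huv⟩ := List.append_of_mem hm
          refine hnc' ⟨'(' :: u, v, ?_⟩
          rw [hdj, huv]; simp
        rw [hskip, hdj]
        simp only [groupsRec, reduceIte]
        rw [pv_innerRec_no_close _ hnc]
        simp
      · obtain ⟨hE1, hE2, hE3, hEp⟩ := pv_findFrom_spec s [')'] _ he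
        set m := (PySem.Chars.findFrom s [')'] (PySem.Chars.findFrom s ['('] (k : Int))).toNat with hmdef
        have hm : PySem.Chars.findFrom s [')'] (PySem.Chars.findFrom s ['('] (k : Int)) = (m : Int) := by
          omega
        have hmlen : m < s.length := by
          by_contra hc
          have hnil : s.drop m = [] := List.drop_eq_nil_of_le (by omega)
          rw [hnil] at hEp; simp at hEp
        have hsm : s[m] = ')' := (pv_single_prefix_drop s m ')' hmlen).mp hEp
        have hjm : j < m := by
          have hle : j ≤ m := by
            have h' := hE1
            rw [hm, hj] at h'
            exact_mod_cast h'
          rcases Nat.lt_or_ge j m with h | h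
          · exact h
          · have hjem : j = m := by omega
            have heq : s[j] = s[m] := getElem_congr_idx hjem
            rw [hsj, hsm] at heq
            simp at heq
        have hEfj : PySem.Chars.findFrom s [')'] ((j : Nat) : Int) = (m : Int) := by
          rw [← hj]; exact hm
        have hEmin := (PySem.Chars.findFrom_natCast_spec s [')'] j (by omega)
          (by rw [hEfj]; omega)).2.2
        rw [hEfj] at hEmin
        simp only [Int.toNat_natCast] at hEmin
        -- unfold one iteration of aLoop
        rw [aLoop, if_neg hf]
        simp only [he, ne_eq, not_false_eq_true, dite_true]
        rw [hm, hj]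
        rw [ih m (by omega) (by omega)]
        -- both sides are now folds; identify the group lists and the first content
        have hcontent : PySem.Chars.slice s (some ((j : Int) + 1)) (some (m : Int))
            = (s.drop (j + 1)).take (m - (j + 1)) := by
          rw [PySem.Chars.slice_eq_listSlice]
          rw [show ((j : Int) + 1) = (((j + 1 : Nat)) : Int) from by push_cast; ring]
          rw [PySem.List.slice_toNat _ (by omega) (by omega)]
          simp
        rw [hcontent]
        rw [hskip, hdj]
        simp only [groupsRec, reduceIte]
        rw [pv_innerRec_at (m - (j + 1)) (s.drop (j + 1)) [] (by simp; omega)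
          (by
            rw [List.getElem_drop]
            rw [getElem_congr_idx (show (j + 1) + (m - (j + 1)) = m from by omega)]
            exact hsm)
          (by
            intro i h h2 hEq
            rw [List.getElem_drop] at hEq
            exact hEmin ((j + 1) + i) (by omega) (by omega)
              ((pv_single_prefix_drop s ((j + 1) + i) ')' (by simp at h; omega)).mpr hEq))]
        rw [List.drop_drop]
        rw [show j + 1 + (m - (j + 1) + 1) = m + 1 from by omega]
        rw [List.drop_eq_getElem_cons hmlen, hsm]
        simp [groupsRec]

-- ===== VERDICT (by name: the statement is the Claim_ definition above) =====
theorem extract_parcelle_spec : Claim_equal_extract_parcelle := by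
  intro lieu _
  unfold Spec_extract_parcelle extract_parcelle extract_parcelle_alt
  have h0 : PySem.Chars.find lieu.toList ['('] = PySem.Chars.findFrom lieu.toList ['('] (((0 : Nat)) : Int) := by
    rw [show (((0 : Nat) : Int)) = (0 : Int) from rfl, PySem.Chars.findFrom_zero]
  rw [h0, pv_aLoop_eq lieu.toList lieu.toList.length 0 (by omega) (by omega)]
  rw [List.drop_zero]
  have hp : (fun (a : List (List Char)) (c : List Char) => procContentA c a)
      = (fun a c => procContentB c a) := by
    funext a c; exact pv_proc_eq c a
  rw [hp]
  have hg : ((lieu.toList.foldl bStep (none, [])).2) = groupsRec lieu.toList := by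
    have := (pv_fold_groups lieu.toList []).1
    simpa using this
  rw [hg]
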